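-- pv_equiv track=rewrite | github.com/OnaiaSavary/WR-and-european-droughts | scripts/weather_regimes.py | declassification
-- ===== SOURCE A (Python) =====
-- def declassification(cluster,jours_min):
--     result = []
--     count = 1
--
--     # Parcourir la liste pour détecter les séquences
--     for i in range(1, len(cluster)):
--         if cluster[i] == cluster[i - 1]:
--             count += 1
--         else:
--             if count <= jours_min:
--                 result.extend([0] * count)
--             else:
--                 result.extend([cluster[i - 1]] * count)
--             count = 1 # Reset le compteur
--
--     # Gérer la dernière séquence
--     if count <= jours_min:
--         result.extend([0] * count)
--     else:
--         result.extend([cluster[-1]] * count)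
--
--     return result
-- ===== SOURCE B (Python) =====
-- def declassification(cluster, jours_min):
--     # Two-pass: run-length encode the cluster sequence first, then emit each run.
--     runs = []
--     for x in cluster:
--         if runs and runs[-1][0] == x:
--             runs[-1][1] += 1
--         else:
--             runs.append([x, 1])
--     result = []
--     for v, n in runs:
--         result.extend(([0] * n) if n <= jours_min else ([v] * n))
--     return result
-- ===== Notes on version B (the rewrite author's own statement) =====
-- stated objective: alternative
-- what changed: Replaces the index-based scan with leftover trailing-block handling by a two-pass run-length encoding: build (value,length) run descriptors in one pass over the elements, then emit each run in a second pass.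
-- intended difference: On an empty cluster with jours_min >= 1 A's unconditional trailing block returns [0] (a day that does not exist); B returns [], the intended result for empty input. — e.g. on declassification([], 1): A returns [0], B returns []
import Mathlib
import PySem

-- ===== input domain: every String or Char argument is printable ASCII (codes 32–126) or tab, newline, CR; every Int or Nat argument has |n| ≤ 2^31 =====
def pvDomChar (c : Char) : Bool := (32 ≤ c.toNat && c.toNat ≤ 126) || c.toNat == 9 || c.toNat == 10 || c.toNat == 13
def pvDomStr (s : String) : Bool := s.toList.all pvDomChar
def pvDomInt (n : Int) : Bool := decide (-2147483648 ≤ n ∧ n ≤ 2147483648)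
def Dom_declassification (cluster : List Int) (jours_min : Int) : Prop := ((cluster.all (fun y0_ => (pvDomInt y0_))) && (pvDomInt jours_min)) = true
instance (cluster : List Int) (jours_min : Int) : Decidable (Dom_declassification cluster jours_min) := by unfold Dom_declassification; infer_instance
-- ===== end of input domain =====

-- B zeroes out runs of length ≤ jours_min via a two-pass run-length encoding instead of A's
-- index scan with a trailing block; B returns [] on empty input where A returns [0] or raises.

-- ===== PORT A =====
def declassification (cluster : List Int) (jours_min : Int) : List Int :=
  let st := (PySem.List.pyRange 1 (cluster.length : Int) 1).foldl
    (fun (st : List Int × Int) i =>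
      if PySem.List.pyGetD cluster i 0 == PySem.List.pyGetD cluster (i - 1) 0 then
        (st.1, st.2 + 1)
      else if st.2 ≤ jours_min then
        (st.1 ++ List.replicate st.2.toNat 0, 1)
      else
        (st.1 ++ List.replicate st.2.toNat (PySem.List.pyGetD cluster (i - 1) 0), 1))
    ([], 1)
  if st.2 ≤ jours_min then st.1 ++ List.replicate st.2.toNat 0
  else st.1 ++ List.replicate st.2.toNat (PySem.List.pyGetD cluster (-1) 0)

-- ===== PORT B =====
-- runs are kept head-first while building (Python appends and mutates runs[-1]) and reversed once.
def declassification_alt (cluster : List Int) (jours_min : Int) : List Int :=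
  let runs := (cluster.foldl
    (fun (acc : List (Int × Int)) x =>
      match acc with
      | (v, n) :: rest => if v == x then (v, n + 1) :: rest else (x, 1) :: (v, n) :: rest
      | [] => [(x, 1)]) []).reverse
  runs.foldl (fun result vn =>
    result ++ (if vn.2 ≤ jours_min then List.replicate vn.2.toNat 0
               else List.replicate vn.2.toNat vn.1)) []

-- ===== PRECONDITION & SPEC =====
-- Pre_ excludes only the empty cluster with jours_min < 1, where A raises IndexError (cluster[-1]).
def Pre_declassification (cluster : List Int) (jours_min : Int) : Prop :=
  cluster ≠ [] ∨ 1 ≤ jours_min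
instance (cluster : List Int) (jours_min : Int) : Decidable (Pre_declassification cluster jours_min) := by unfold Pre_declassification; infer_instance
def pvWitness_declassification : List Int × Int := ([1, 1, 2], 1)

-- On an empty cluster with jours_min ≥ 1 A's unconditional trailing block returns [0]
-- (a day that does not exist); B returns [], the intended result for empty input.
def D_declassification (cluster : List Int) (jours_min : Int) : Prop :=
  cluster = [] ∧ 1 ≤ jours_min
instance (cluster : List Int) (jours_min : Int) : Decidable (D_declassification cluster jours_min) := by unfold D_declassification; infer_instance

def Spec_declassification (cluster : List Int) (jours_min : Int) (out : List Int) : Prop :=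
  ¬ D_declassification cluster jours_min → out = declassification_alt cluster jours_min
instance (cluster : List Int) (jours_min : Int) (out : List Int) : Decidable (Spec_declassification cluster jours_min out) := by unfold Spec_declassification; infer_instance

def pvDiffWitness_declassification : List Int × Int := ([], 1)
def pvDiffWitnessOut_declassification : (List Int) × (List Int) := ([0], [])

-- ===== CLAIM (what is proved, stated in full; the proofs are below) =====
def Claim_unchanged_declassification : Prop := ∀ (cluster : List Int) (jours_min : Int), Dom_declassification cluster jours_min → Pre_declassification cluster jours_min → Spec_declassification cluster jours_min (declassification cluster jours_min)
def Claim_changed_declassification : Prop := Dom_declassification (pvDiffWitness_declassification.1) (pvDiffWitness_declassification.2) ∧ Pre_declassification (pvDiffWitness_declassification.1) (pvDiffWitness_declassification.2) ∧ D_declassification (pvDiffWitness_declassification.1) (pvDiffWitness_declassification.2) ∧ declassification (pvDiffWitness_declassification.1) (pvDiffWitness_declassification.2) = pvDiffWitnessOut_declassification.1 ∧ declassification_alt (pvDiffWitness_declassification.1) (pvDiffWitness_declassification.2) = pvDiffWitnessOut_declassification.2 ∧ pvDiffWitnessOut_declassification.1 ≠ pvDiffWitnessOut_declassification.2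
def Claim_exact_declassification : Prop := ∀ (cluster : List Int) (jours_min : Int), Dom_declassification cluster jours_min → Pre_declassification cluster jours_min → D_declassification cluster jours_min → declassification cluster jours_min ≠ declassification_alt cluster jours_min

-- ===== LEMMAS AND PROOFS =====

-- the block emitted for one run (value, length)
def pvChunk (jm : Int) (vn : Int × Int) : List Int :=
  if vn.2 ≤ jm then List.replicate vn.2.toNat 0 else List.replicate vn.2.toNat vn.1

-- reference recursion: process the rest of the list with current run (prev, count)
def pvLoop (jm prev : Int) (rest : List Int) (count : Int) : List Int :=
  match rest with
  | [] => pvChunk jm (prev, count)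
  | x :: xs => if prev == x then pvLoop jm prev xs (count + 1)
               else pvChunk jm (prev, count) ++ pvLoop jm x xs 1

-- A's loop body and "rest of A from index k" as named functions
def pvBody (L : List Int) (jm : Int) (st : List Int × Int) (i : Int) : List Int × Int :=
  if PySem.List.pyGetD L i 0 == PySem.List.pyGetD L (i - 1) 0 then
    (st.1, st.2 + 1)
  else if st.2 ≤ jm then
    (st.1 ++ List.replicate st.2.toNat 0, 1)
  else
    (st.1 ++ List.replicate st.2.toNat (PySem.List.pyGetD L (i - 1) 0), 1)

def pvAfold (L : List Int) (jm k : Int) (st : List Int × Int) : List Int :=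
  let st' := (PySem.List.pyRange k (L.length : Int) 1).foldl (pvBody L jm) st
  if st'.2 ≤ jm then st'.1 ++ List.replicate st'.2.toNat 0
  else st'.1 ++ List.replicate st'.2.toNat (PySem.List.pyGetD L (-1) 0)

lemma pvAfold_eq (L : List Int) (jm : Int) :
    ∀ (m k : Nat) (prev count : Int) (result : List Int),
      L.length - k = m → 1 ≤ k → k ≤ L.length → L.getD (k - 1) 0 = prev →
      pvAfold L jm (k : Int) (result, count) = result ++ pvLoop jm prev (L.drop k) count := by
  intro m
  induction m with
  | zero =>
    intro k prev count result hm hk1 hkle hprev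
    have hk : k = L.length := by omega
    subst hk
    have hne : L ≠ [] := by intro h; subst h; simp at hk1
    unfold pvAfold
    rw [PySem.List.pyRange_one_eq_nil (by exact_mod_cast le_refl _)]
    simp only [List.foldl_nil, List.drop_length, pvLoop, pvChunk]
    rw [PySem.List.pyGetD_neg_one L 0 hne]
    have hlast : L.getLast hne = prev := by
      rw [List.getLast_eq_getElem, ← hprev, List.getD_eq_getElem L 0 (by omega)]
    rw [hlast]
    split <;> rfl
  | succ m ih =>
    intro k prev count result hm hk1 hkle hprev
    have hklt : k < L.length := by omega
    have hgk : PySem.List.pyGetD L (k : Int) 0 = L[k] := by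
      rw [PySem.List.pyGetD_natCast]; exact List.getD_eq_getElem L 0 hklt
    have hgk1 : PySem.List.pyGetD L ((k : Int) - 1) 0 = prev := by
      have hc : ((k : Int) - 1) = ((k - 1 : Nat) : Int) := by omega
      rw [hc, PySem.List.pyGetD_natCast]; exact hprev
    have hdrop : L.drop k = L[k] :: L.drop (k + 1) := List.drop_eq_getElem_cons hklt
    have hnext : L.getD (k + 1 - 1) 0 = L[k] := by
      simpa using List.getD_eq_getElem L 0 hklt
    have hstep : pvAfold L jm (k : Int) (result, count) =
        pvAfold L jm ((k + 1 : Nat) : Int) (pvBody L jm (result, count) (k : Int)) := by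
      unfold pvAfold
      rw [PySem.List.pyRange_one_cons (by exact_mod_cast hklt), List.foldl_cons,
        show ((k : Int) + 1) = ((k + 1 : Nat) : Int) by push_cast; ring]
    rw [hstep, hdrop]
    by_cases he : L[k] = prev
    · have hb : pvBody L jm (result, count) (k : Int) = (result, count + 1) := by
        unfold pvBody; rw [hgk, hgk1]; simp [he]
      rw [hb, ih (k + 1) prev (count + 1) result (by omega) (by omega) (by omega)
        (by rw [hnext, he])]
      rw [pvLoop, if_pos (by simp [he])]
    · have hne' : ¬((prev == L[k]) = true) := by simpa using Ne.symm he
      rw [pvLoop, if_neg hne']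
      by_cases hc : count ≤ jm
      · have hb : pvBody L jm (result, count) (k : Int) =
            (result ++ List.replicate count.toNat 0, 1) := by
          unfold pvBody; rw [hgk, hgk1]; simp [he, hc]
        rw [hb, ih (k + 1) L[k] 1 _ (by omega) (by omega) (by omega) hnext]
        simp [pvChunk, hc, List.append_assoc]
      · have hb : pvBody L jm (result, count) (k : Int) =
            (result ++ List.replicate count.toNat prev, 1) := by
          unfold pvBody; rw [hgk, hgk1]; simp [he, hc]
        rw [hb, ih (k + 1) L[k] 1 _ (by omega) (by omega) (by omega) hnext]
        simp [pvChunk, hc, List.append_assoc]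

lemma pvB_loop (jm : Int) :
    ∀ (rest : List Int) (prev count : Int) (revruns : List (Int × Int)),
      ((rest.foldl
        (fun (acc : List (Int × Int)) x =>
          match acc with
          | (v, n) :: rs => if v == x then (v, n + 1) :: rs else (x, 1) :: (v, n) :: rs
          | [] => [(x, 1)]) ((prev, count) :: revruns)).reverse).flatMap (pvChunk jm) =
      revruns.reverse.flatMap (pvChunk jm) ++ pvLoop jm prev rest count := by
  intro rest
  induction rest with
  | nil => intro prev count revruns; simp [pvLoop]
  | cons x xs ih =>
    intro prev count revruns
    simp only [List.foldl_cons]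
    by_cases he : prev == x
    · rw [if_pos he, ih, pvLoop, if_pos he]
    · rw [if_neg he, ih x 1 ((prev, count) :: revruns), pvLoop, if_neg he]
      simp [List.append_assoc]

lemma pvA_eq_loop (c0 : Int) (cs : List Int) (jm : Int) :
    declassification (c0 :: cs) jm = pvLoop jm c0 cs 1 := by
  have h0 : declassification (c0 :: cs) jm = pvAfold (c0 :: cs) jm ((1 : Nat) : Int) ([], 1) := rfl
  have h := pvAfold_eq (c0 :: cs) jm cs.length 1 c0 1 [] (by simp) (le_refl 1) (by simp) (by simp)
  rw [h0, h]; simp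

lemma pvB_eq_loop (c0 : Int) (cs : List Int) (jm : Int) :
    declassification_alt (c0 :: cs) jm = pvLoop jm c0 cs 1 := by
  unfold declassification_alt
  simp only [List.foldl_cons]
  rw [show (fun (result : List Int) (vn : Int × Int) => result ++
        (if vn.2 ≤ jm then List.replicate vn.2.toNat 0 else List.replicate vn.2.toNat vn.1)) =
      (fun acc x => acc ++ pvChunk jm x) from rfl]
  rw [PySem.List.foldl_append_eq_flatMap (g := pvChunk jm)]
  simpa using pvB_loop jm cs c0 1 []

-- ===== VERDICT (by name: the statement is the Claim_ definition above) =====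
theorem declassification_spec : Claim_unchanged_declassification := by
  intro cluster jm _ hpre hnd
  show declassification cluster jm = declassification_alt cluster jm
  match cluster with
  | [] =>
    exfalso
    rcases hpre with h | h
    · exact h rfl
    · exact hnd ⟨rfl, h⟩
  | c0 :: cs => rw [pvA_eq_loop, pvB_eq_loop]

theorem declassification_changed : Claim_changed_declassification := by
  unfold Claim_changed_declassification; decide

theorem declassification_tight : Claim_exact_declassification := by
  intro cluster jm _ _ hd
  obtain ⟨hnil, hjm⟩ := hd
  subst hnil
  have ha : declassification [] jm = [0] := by
    unfold declassification
    rw [PySem.List.pyRange_one_eq_nil (by norm_num)]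
    simp [hjm]
  have hb : declassification_alt [] jm = [] := by
    unfold declassification_alt; simp
  simp [ha, hb]
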